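-- pv_equiv track=rewrite | github.com/MuhLibri/Gomoku_Bot | bots/Bot13521047.py | get_horizontal
-- ===== SOURCE A (Python) =====
-- def get_horizontal(positions: list):
--     horizontalList = []
--     if (len(positions) != 0):
--         tempList = [positions[0]]
--         i = 1
--         j = 0
--
--         while (i < len(positions)):
--             if (positions[i][0] == tempList[j][0] and (abs(positions[i][1] - tempList[j][1]) == 1)):
--                 tempList.append(positions[i])
--                 j = j + 1
--             else:
--                 horizontalList.append(tempList.copy())
--                 tempList = [positions[i]]
--                 j = 0
--             i = i + 1
--
--         horizontalList.append(tempList.copy())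
--
--     return horizontalList
-- ===== SOURCE B (Python) =====
-- def get_horizontal(positions: list):
--     if not positions:
--         return []
--     # pass 1: boundary indices where a new run starts
--     bounds = [0]
--     for i in range(1, len(positions)):
--         if positions[i][0] != positions[i - 1][0] or abs(positions[i][1] - positions[i - 1][1]) != 1:
--             bounds.append(i)
--     bounds.append(len(positions))
--     # pass 2: partition by slicing between consecutive boundaries
--     return [positions[a:b] for a, b in zip(bounds, bounds[1:])]
-- ===== Notes on version B (the rewrite author's own statement) =====
-- stated objective: alternative
-- what changed: Replaces A's single incremental grouping pass (tempList/j bookkeeping with a final flush) by two staged passes: first compute the list of boundary indices where a new run starts (plus the sentinel len(positions)), then build the result by slicing positions between consecutive boundaries.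
import Mathlib
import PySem

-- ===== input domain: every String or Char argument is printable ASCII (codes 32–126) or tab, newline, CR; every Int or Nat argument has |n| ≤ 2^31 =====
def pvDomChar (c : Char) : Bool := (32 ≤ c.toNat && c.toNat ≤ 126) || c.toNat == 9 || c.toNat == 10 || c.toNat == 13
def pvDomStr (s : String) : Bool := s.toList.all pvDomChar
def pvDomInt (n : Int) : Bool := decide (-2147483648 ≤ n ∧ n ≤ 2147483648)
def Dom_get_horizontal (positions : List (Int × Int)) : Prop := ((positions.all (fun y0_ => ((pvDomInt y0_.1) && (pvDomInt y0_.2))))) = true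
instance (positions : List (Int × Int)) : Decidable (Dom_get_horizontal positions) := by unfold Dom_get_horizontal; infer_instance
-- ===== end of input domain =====

-- B replaces A's single incremental grouping pass (tempList/j bookkeeping, final flush)
-- by two staged passes: collect the boundary indices where a new run starts, then slice
-- positions between consecutive boundaries. Objective: alternative.


-- ===== PORT A =====
-- A's while loop over i, with state (horizontalList, tempList, j); positions[i] is the
-- head of `rest`, tempList[j] is read with getD (j is always in range in A's loop).
def get_horizontalLoop (rest : List (Int × Int)) (hl : List (List (Int × Int)))
    (tmp : List (Int × Int)) (j : Nat) : List (List (Int × Int)) :=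
  match rest with
  | [] => hl ++ [tmp]
  | p :: rs =>
      let t := tmp.getD j (0, 0)
      if p.1 = t.1 ∧ (p.2 - t.2).natAbs = 1 then
        get_horizontalLoop rs hl (tmp ++ [p]) (j + 1)
      else
        get_horizontalLoop rs (hl ++ [tmp]) [p] 0

def get_horizontal (positions : List (Int × Int)) : List (List (Int × Int)) :=
  match positions with
  | [] => []
  | p :: rest => get_horizontalLoop rest [] [p] 0

-- ===== PORT B =====
-- Source B's inline boundary test: positions[i] starts a new run
def altBrk (positions : List (Int × Int)) (i : Nat) : Bool :=
  let cur := positions.getD i (0, 0)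
  let prev := positions.getD (i - 1) (0, 0)
  cur.1 != prev.1 || (cur.2 - prev.2).natAbs != 1

-- pass 1: boundary indices; range(1, len(positions)) visits only nonnegative in-range
-- indices, so Nat indexing with getD is exact here
def altBounds (positions : List (Int × Int)) : List Nat :=
  (List.range' 1 (positions.length - 1)).foldl
    (fun bs i => if altBrk positions i then bs ++ [i] else bs) [0]

-- positions[a:b]; exact for 0 ≤ a ≤ b ≤ len, which holds for consecutive boundaries
def sliceN (xs : List (Int × Int)) (a b : Nat) : List (Int × Int) :=
  (xs.drop a).take (b - a)

def get_horizontal_alt (positions : List (Int × Int)) : List (List (Int × Int)) :=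
  match positions with
  | [] => []
  | _ =>
      let bounds := altBounds positions ++ [positions.length]
      (bounds.zip bounds.tail).map (fun ab => sliceN positions ab.1 ab.2)

-- ===== PRECONDITION & SPEC =====
def Spec_get_horizontal (positions : List (Int × Int)) (out : List (List (Int × Int))) : Prop := out = get_horizontal_alt positions
instance (positions : List (Int × Int)) (out : List (List (Int × Int))) : Decidable (Spec_get_horizontal positions out) := by unfold Spec_get_horizontal; infer_instance

-- ===== CLAIM (what is proved, stated in full; the proofs are below) =====
def Claim_equal_get_horizontal : Prop := ∀ (positions : List (Int × Int)), Dom_get_horizontal positions → Spec_get_horizontal positions (get_horizontal positions)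

-- ===== LEMMAS AND PROOFS =====

-- canonical middle form: one grouping step of a right fold
def grpStep (p : Int × Int) (groups : List (List (Int × Int))) :
    List (List (Int × Int)) :=
  match groups with
  | (q :: qs) :: gs =>
      if p.1 = q.1 ∧ (p.2 - q.2).natAbs = 1 then (p :: q :: qs) :: gs
      else [p] :: (q :: qs) :: gs
  | _ => [p] :: groups

-- ---- A side: get_horizontal = foldr grpStep [] ----

-- attach a pending run `tmp`, whose last element is `t`, to the front of grouped output
def mergeLastE (t : Int × Int) (tmp : List (Int × Int)) (groups : List (List (Int × Int))) :
    List (List (Int × Int)) :=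
  match groups with
  | (q :: qs) :: gs =>
      if t.1 = q.1 ∧ (t.2 - q.2).natAbs = 1 then (tmp ++ q :: qs) :: gs
      else tmp :: (q :: qs) :: gs
  | _ => tmp :: groups

theorem getD_append_last (tmp : List (Int × Int)) (p : Int × Int) :
    (tmp ++ [p]).getD ((tmp ++ [p]).length - 1) (0, 0) = p := by
  simp [List.getD_eq_getElem?_getD]

theorem mergeLastE_single (p : Int × Int) (G : List (List (Int × Int))) :
    mergeLastE p [p] G = grpStep p G := by
  cases G with
  | nil => rfl
  | cons g gs =>
      cases g with
      | nil => rfl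
      | cons q qs => simp [mergeLastE, grpStep]

theorem mergeLastE_step_adj (t : Int × Int) (tmp : List (Int × Int)) (p : Int × Int)
    (G : List (List (Int × Int)))
    (h : p.1 = t.1 ∧ (p.2 - t.2).natAbs = 1) :
    mergeLastE p (tmp ++ [p]) G = mergeLastE t tmp (grpStep p G) := by
  obtain ⟨h1, h2⟩ := h
  have hsym : (t.2 - p.2).natAbs = 1 := by omega
  cases G with
  | nil => simp [mergeLastE, grpStep, h1.symm, hsym]
  | cons g gs =>
      cases g with
      | nil => simp [mergeLastE, grpStep, h1.symm, hsym]
      | cons q qs =>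
          by_cases hq : p.1 = q.1 ∧ (p.2 - q.2).natAbs = 1
          · simp [mergeLastE, grpStep, hq, h1.symm, hsym]
          · simp [mergeLastE, grpStep, hq, h1.symm, hsym]

theorem mergeLastE_step_nadj (t : Int × Int) (tmp : List (Int × Int)) (p : Int × Int)
    (G : List (List (Int × Int)))
    (h : ¬ (p.1 = t.1 ∧ (p.2 - t.2).natAbs = 1)) :
    mergeLastE t tmp (grpStep p G) = tmp :: grpStep p G := by
  have hsym : ¬ (t.1 = p.1 ∧ (t.2 - p.2).natAbs = 1) := by
    intro ⟨a, b⟩; exact h ⟨a.symm, by omega⟩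
  have key : ∀ (l : List (Int × Int)) (gs : List (List (Int × Int))),
      mergeLastE t tmp ((p :: l) :: gs) = tmp :: (p :: l) :: gs := by
    intro l gs; simp [mergeLastE, hsym]
  cases G with
  | nil => exact key [] []
  | cons g gs =>
      cases g with
      | nil => exact key [] ([] :: gs)
      | cons q qs =>
          by_cases hq : p.1 = q.1 ∧ (p.2 - q.2).natAbs = 1
          · simp only [grpStep, if_pos hq]; exact key (q :: qs) gs
          · simp only [grpStep, if_neg hq]; exact key [] ((q :: qs) :: gs)

theorem loop_eq (rest : List (Int × Int)) :
    ∀ (hl : List (List (Int × Int))) (tmp : List (Int × Int)), tmp ≠ [] →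
    get_horizontalLoop rest hl tmp (tmp.length - 1) =
      hl ++ mergeLastE (tmp.getD (tmp.length - 1) (0, 0)) tmp
        (rest.foldr grpStep []) := by
  induction rest with
  | nil => intro hl tmp _; simp [get_horizontalLoop, mergeLastE]
  | cons p rs ih =>
      intro hl tmp htmp
      simp only [get_horizontalLoop, List.foldr_cons]
      by_cases h : p.1 = (tmp.getD (tmp.length - 1) (0, 0)).1 ∧
          (p.2 - (tmp.getD (tmp.length - 1) (0, 0)).2).natAbs = 1
      · rw [if_pos h]
        have hlen : tmp.length - 1 + 1 = (tmp ++ [p]).length - 1 := by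
          cases tmp with
          | nil => exact absurd rfl htmp
          | cons a tl => simp
        rw [hlen, ih hl (tmp ++ [p]) (by simp), getD_append_last,
          mergeLastE_step_adj _ tmp p _ h]
      · rw [if_neg h,
          show (0 : Nat) = ([p] : List (Int × Int)).length - 1 by simp,
          ih (hl ++ [tmp]) [p] (by simp),
          show ([p] : List (Int × Int)).getD (([p] : List (Int × Int)).length - 1) (0, 0) = p from rfl,
          mergeLastE_single, mergeLastE_step_nadj _ tmp p _ h]
        simp

theorem a_eq_foldr (positions : List (Int × Int)) :
    get_horizontal positions = positions.foldr grpStep [] := by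
  cases positions with
  | nil => rfl
  | cons p rest =>
      show get_horizontalLoop rest [] [p] 0 = _
      rw [show (0 : Nat) = ([p] : List (Int × Int)).length - 1 by simp,
        loop_eq rest [] [p] (by simp)]
      show mergeLastE p [p] _ = _
      rw [mergeLastE_single]
      rfl

-- ---- B side: get_horizontal_alt = foldr grpStep [] ----

-- inner boundary indices, recursively (relative to the whole list)
def innerIdx : List (Int × Int) → List Nat
  | p :: q :: rs =>
      (if q.1 ≠ p.1 ∨ (q.2 - p.2).natAbs ≠ 1 then [1] else []) ++
        (innerIdx (q :: rs)).map (· + 1)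
  | _ => []

def slicesFrom (xs : List (Int × Int)) : Nat → List Nat → List (List (Int × Int))
  | _, [] => []
  | a, b :: bs => sliceN xs a b :: slicesFrom xs b bs

theorem zip_map_eq_slicesFrom (xs : List (Int × Int)) :
    ∀ (bs : List Nat) (a : Nat),
      (((a :: bs).zip bs).map (fun ab => sliceN xs ab.1 ab.2)) = slicesFrom xs a bs := by
  intro bs
  induction bs with
  | nil => intro a; rfl
  | cons b bs ih => intro a; simp [slicesFrom, ← ih b]

theorem range'_shift (k : Nat) : ∀ s, List.range' (s + 1) k = (List.range' s k).map (· + 1) := by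
  induction k with
  | zero => intro s; rfl
  | succ k ih =>
      intro s
      rw [List.range'_succ, List.range'_succ, List.map_cons, ih (s + 1)]

theorem innerIdx_ge_one : ∀ (xs : List (Int × Int)) (i : Nat), i ∈ innerIdx xs → 1 ≤ i := by
  intro xs
  match xs with
  | [] => intro i h; simp [innerIdx] at h
  | [p] => intro i h; simp [innerIdx] at h
  | p :: q :: rs =>
      intro i h
      simp only [innerIdx, List.mem_append, List.mem_map] at h
      rcases h with h | ⟨j, _, hj⟩
      · split at h <;> simp at h <;> omega
      · omega

theorem filter_eq_innerIdx : ∀ (positions : List (Int × Int)),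
    (List.range' 1 (positions.length - 1)).filter (altBrk positions) = innerIdx positions := by
  intro positions
  match positions with
  | [] => rfl
  | [p] => rfl
  | p :: q :: rs =>
      have ih := filter_eq_innerIdx (q :: rs)
      have hlen : (p :: q :: rs).length - 1 = rs.length + 1 := by simp
      rw [hlen, List.range'_succ, List.filter_cons]
      have h2 : List.range' 2 rs.length = (List.range' 1 rs.length).map (· + 1) :=
        range'_shift rs.length 1
      have hmap : ((List.range' 1 rs.length).map (· + 1)).filter (altBrk (p :: q :: rs)) =
          ((List.range' 1 rs.length).filter (fun i => altBrk (p :: q :: rs) (i + 1))).map (· + 1) := by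
        rw [List.filter_map]; rfl
      have hcong : (List.range' 1 rs.length).filter (fun i => altBrk (p :: q :: rs) (i + 1)) =
          (List.range' 1 rs.length).filter (altBrk (q :: rs)) := by
        apply List.filter_congr
        intro i hi
        have h1 : 1 ≤ i := (List.mem_range'_1.mp hi).1
        obtain ⟨j, rfl⟩ : ∃ j, i = j + 1 := ⟨i - 1, by omega⟩
        simp [altBrk]
      have hbrk : altBrk (p :: q :: rs) 1 = decide (q.1 ≠ p.1 ∨ (q.2 - p.2).natAbs ≠ 1) := by
        by_cases h1 : q.1 = p.1 <;> by_cases h2 : (q.2 - p.2).natAbs = 1 <;>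
          simp [altBrk, List.getD, h1, h2]
      simp only [List.length_cons, Nat.add_sub_cancel] at ih
      rw [h2, hmap, hcong, ih]
      by_cases hb : q.1 ≠ p.1 ∨ (q.2 - p.2).natAbs ≠ 1
      · simp [innerIdx, hbrk, hb]
      · simp [innerIdx, hbrk, hb]

theorem slicesFrom_shift (p : Int × Int) (xs : List (Int × Int)) :
    ∀ (bs : List Nat) (a : Nat),
      slicesFrom (p :: xs) (a + 1) (bs.map (· + 1)) = slicesFrom xs a bs := by
  intro bs
  induction bs with
  | nil => intro a; rfl
  | cons b bs ih =>
      intro a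
      simp only [List.map_cons, slicesFrom, ih b]
      congr 1
      simp [sliceN]

theorem grpStep_head (r : Int × Int) (X : List (List (Int × Int))) :
    ∃ l gs, grpStep r X = (r :: l) :: gs := by
  match X with
  | [] => exact ⟨[], [], rfl⟩
  | [] :: gs => exact ⟨[], [] :: gs, rfl⟩
  | (q :: qs) :: gs =>
      by_cases hq : r.1 = q.1 ∧ (r.2 - q.2).natAbs = 1
      · exact ⟨q :: qs, gs, by simp [grpStep, hq]⟩
      · exact ⟨[], (q :: qs) :: gs, by simp [grpStep, hq]⟩

theorem slicesFrom_main : ∀ (rs : List (Int × Int)) (q : Int × Int),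
    slicesFrom (q :: rs) 0 (innerIdx (q :: rs) ++ [rs.length + 1]) =
      (q :: rs).foldr grpStep [] := by
  intro rs
  induction rs with
  | nil => intro q; rfl
  | cons r rs' ih =>
      intro q
      simp only [List.length_cons]
      have hIH := ih r
      have hsucc : rs'.length + 1 + 1 = (rs'.length + 1) + 1 := rfl
      by_cases hb : r.1 ≠ q.1 ∨ (r.2 - q.2).natAbs ≠ 1
      · -- boundary between q and r: groups are [q] :: groups of (r :: rs')
        have hlist : innerIdx (q :: r :: rs') ++ [rs'.length + 1 + 1] =
            1 :: (innerIdx (r :: rs') ++ [rs'.length + 1]).map (· + 1) := by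
          simp [innerIdx, hb]
        rw [hlist]
        show sliceN (q :: r :: rs') 0 1 ::
            slicesFrom (q :: r :: rs') 1 ((innerIdx (r :: rs') ++ [rs'.length + 1]).map (· + 1)) = _
        rw [show (1 : Nat) = 0 + 1 from rfl, slicesFrom_shift, hIH]
        obtain ⟨l, gs, hX⟩ := grpStep_head r ((rs').foldr grpStep [])
        have hnadj : ¬ (q.1 = r.1 ∧ (q.2 - r.2).natAbs = 1) := by
          rcases hb with h | h
          · intro ⟨a, _⟩; exact h a.symm
          · intro ⟨_, b⟩; apply h; omega
        show _ = grpStep q ((r :: rs').foldr grpStep [])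
        simp only [List.foldr_cons] at hX ⊢
        rw [hX, grpStep, if_neg hnadj]
        rfl
      · -- q adjacent to r: q is prepended to the first group of (r :: rs')
        push_neg at hb
        have hlist : innerIdx (q :: r :: rs') ++ [rs'.length + 1 + 1] =
            (innerIdx (r :: rs') ++ [rs'.length + 1]).map (· + 1) := by
          simp [innerIdx, hb.1, hb.2]
        rw [hlist]
        obtain ⟨b, bs', hbs⟩ : ∃ b bs', innerIdx (r :: rs') ++ [rs'.length + 1] = b :: bs' := by
          cases h : innerIdx (r :: rs') ++ [rs'.length + 1] with
          | nil => exact absurd h (by simp)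
          | cons b bs' => exact ⟨b, bs', rfl⟩
        have hb1 : 1 ≤ b := by
          cases h : innerIdx (r :: rs') with
          | nil => rw [h] at hbs; simp at hbs; omega
          | cons x xs =>
              rw [h] at hbs
              have : b = x := by simpa using (congrArg (List.headD · 0) hbs).symm
              subst this
              exact innerIdx_ge_one (r :: rs') b (by simp [h])
        rw [hbs]
        show slicesFrom (q :: r :: rs') 0 ((b :: bs').map (· + 1)) = _
        simp only [List.map_cons, slicesFrom]
        rw [show (b + 1 : Nat) = b + 1 from rfl]
        have hshift : slicesFrom (q :: r :: rs') (b + 1) (bs'.map (· + 1)) =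
            slicesFrom (r :: rs') b bs' := slicesFrom_shift q (r :: rs') bs' b
        rw [hshift]
        have hslice0 : sliceN (q :: r :: rs') 0 (b + 1) = q :: sliceN (r :: rs') 0 b := by
          simp [sliceN]
        rw [hslice0]
        have hG : (r :: rs').foldr grpStep [] = sliceN (r :: rs') 0 b :: slicesFrom (r :: rs') b bs' := by
          rw [← hIH, hbs]; rfl
        have hslice_head : sliceN (r :: rs') 0 b = r :: (rs'.take (b - 1)) := by
          obtain ⟨c, rfl⟩ : ∃ c, b = c + 1 := ⟨b - 1, by omega⟩
          simp [sliceN]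
        have hadj : q.1 = r.1 ∧ (q.2 - r.2).natAbs = 1 := ⟨hb.1.symm, by omega⟩
        show _ = grpStep q ((r :: rs').foldr grpStep [])
        rw [hG, hslice_head, grpStep, if_pos hadj]

theorem b_eq_foldr (positions : List (Int × Int)) :
    get_horizontal_alt positions = positions.foldr grpStep [] := by
  cases positions with
  | nil => rfl
  | cons p rest =>
      show ((altBounds (p :: rest) ++ [(p :: rest).length]).zip
          (altBounds (p :: rest) ++ [(p :: rest).length]).tail).map
          (fun ab => sliceN (p :: rest) ab.1 ab.2) = _
      have hbounds : altBounds (p :: rest) = 0 :: innerIdx (p :: rest) := by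
        unfold altBounds
        rw [PySem.List.foldl_append_if_eq_filter, filter_eq_innerIdx]
        rfl
      rw [hbounds]
      have hlen : (p :: rest).length = rest.length + 1 := by simp
      rw [hlen]
      have : (0 :: innerIdx (p :: rest)) ++ [rest.length + 1] =
          0 :: (innerIdx (p :: rest) ++ [rest.length + 1]) := rfl
      rw [this]
      rw [show ((0 : Nat) :: (innerIdx (p :: rest) ++ [rest.length + 1])).tail =
        innerIdx (p :: rest) ++ [rest.length + 1] from rfl]
      rw [zip_map_eq_slicesFrom (p :: rest) (innerIdx (p :: rest) ++ [rest.length + 1]) 0]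
      exact slicesFrom_main rest p

-- ===== VERDICT (by name: the statement is the Claim_ definition above) =====
theorem get_horizontal_spec : Claim_equal_get_horizontal := by
  intro positions _
  unfold Spec_get_horizontal
  rw [a_eq_foldr, b_eq_foldr]
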